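-- pv_equiv track=rewrite | github.com/fmeer-code/polymarket | sportradar_api.py | _split_line_into_json_fragments
-- ===== SOURCE A (Python) =====
-- def _split_line_into_json_fragments(line: str):
--     """
--     Sportradar occasionally concatenates objects back-to-back like `}{`.
--     This splits those into parseable fragments while preserving braces.
--     """
--     if "}{" not in line:
--         return [line]
--
--     fragments = []
--     parts = line.split("}{")
--     for idx, part in enumerate(parts):
--         if idx != 0:
--             part = "{" + part
--         if idx != len(parts) - 1:
--             part = part + "}"
--         fragments.append(part)
--     return fragments
-- ===== SOURCE B (Python) =====
-- def _split_line_into_json_fragments(line: str):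
--     # Single buffered scan: split at every "}{" boundary while keeping braces.
--     fragments = []
--     current = ""
--     n = len(line)
--     for i, ch in enumerate(line):
--         current += ch
--         if ch == "}" and i + 1 < n and line[i + 1] == "{":
--             fragments.append(current)
--             current = ""
--     fragments.append(current)
--     return fragments
-- ===== Notes on version B (the rewrite author's own statement) =====
-- stated objective: alternative
-- what changed: Replaces the contains-check + split("}{" ) + indexed reassembly loop by a single buffered left-to-right scan that emits a fragment whenever a '}' is immediately followed by '{', absorbing the early-return into the same code path.
import Mathlib
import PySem

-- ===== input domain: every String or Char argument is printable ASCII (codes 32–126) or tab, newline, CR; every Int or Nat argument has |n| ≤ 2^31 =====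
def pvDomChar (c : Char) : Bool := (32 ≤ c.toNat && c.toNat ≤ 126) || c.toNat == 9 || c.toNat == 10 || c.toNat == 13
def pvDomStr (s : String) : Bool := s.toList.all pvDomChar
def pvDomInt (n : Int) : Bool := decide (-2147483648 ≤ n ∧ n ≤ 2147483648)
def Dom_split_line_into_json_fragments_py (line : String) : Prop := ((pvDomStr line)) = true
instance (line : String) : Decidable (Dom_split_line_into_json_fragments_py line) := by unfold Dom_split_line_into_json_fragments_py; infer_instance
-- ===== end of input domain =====

-- B replaces A's contains-check + split("}{") + indexed reassembly by one buffered scan; alternative decomposition, same cost.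
-- String concatenation is ported on List Char (exact; String.ofList/String.toList bridge).

-- ===== PORT A =====
def split_line_into_json_fragments_py (line : String) : List String :=
  if PySem.Str.isIn "}{" line = false then [line]
  else
    let parts : List (List Char) := PySem.Chars.splitOn line.toList "}{".toList
    let fragments : List (List Char) :=
      (PySem.List.enumerate parts).foldl
        (fun fragments p =>
          let part := if p.1 ≠ 0 then '{' :: p.2 else p.2
          let part := if p.1 ≠ (parts.length : Int) - 1 then part ++ ['}'] else part
          fragments ++ [part]) []
    fragments.map String.ofList

-- ===== PORT B =====
-- the loop of Source B: `current` buffer, emit whenever the char is '}' and the next one is '{'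
def pvAltGo : List Char → List Char → List (List Char)
  | current, [] => [current]
  | current, c :: rest =>
    if c == '}' && rest.head? == some '{' then
      (current ++ [c]) :: pvAltGo [] rest
    else
      pvAltGo (current ++ [c]) rest

def split_line_into_json_fragments_py_alt (line : String) : List String :=
  (pvAltGo [] line.toList).map String.ofList

-- ===== PRECONDITION & SPEC =====
def Spec_split_line_into_json_fragments_py (line : String) (out : List String) : Prop := out = split_line_into_json_fragments_py_alt line
instance (line : String) (out : List String) : Decidable (Spec_split_line_into_json_fragments_py line out) := by unfold Spec_split_line_into_json_fragments_py; infer_instance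

-- ===== CLAIM (what is proved, stated in full; the proofs are below) =====
def Claim_equal_split_line_into_json_fragments_py : Prop := ∀ (line : String), Dom_split_line_into_json_fragments_py line → Spec_split_line_into_json_fragments_py line (split_line_into_json_fragments_py line)

-- ===== LEMMAS AND PROOFS =====

-- prepend `pre` to the head fragment
def pvConsHead (pre : List Char) : List (List Char) → List (List Char)
  | [] => [pre]
  | h :: t => (pre ++ h) :: t

-- clean recursive characterisation of Python's split on "}{"
def pvSplit : List Char → List (List Char)
  | [] => [[]]
  | '}' :: '{' :: rest => [] :: pvSplit rest
  | c :: rest => pvConsHead [c] (pvSplit rest)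

-- A's reassembly, recursively: parts after the first (prepend '{'; append '}' unless last)
def pvDeco : List (List Char) → List (List Char)
  | [] => []
  | [p] => ['{' :: p]
  | p :: q :: t => ('{' :: (p ++ ['}'])) :: pvDeco (q :: t)

-- A's reassembly including the first part (append '}' unless it is also last)
def pvDecoTop : List (List Char) → List (List Char)
  | [] => []
  | [p] => [p]
  | p :: q :: t => (p ++ ['}']) :: pvDeco (q :: t)

theorem pvConsHead_ne_nil (pre : List Char) (m : List (List Char)) : pvConsHead pre m ≠ [] := by
  cases m <;> simp [pvConsHead]

theorem pvConsHead_nil (m : List (List Char)) (h : m ≠ []) : pvConsHead [] m = m := by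
  rcases m with _ | ⟨h1, t⟩
  · exact absurd rfl h
  · simp [pvConsHead]

theorem pvConsHead_consHead (a b : List Char) (m : List (List Char)) :
    pvConsHead a (pvConsHead b m) = pvConsHead (a ++ b) m := by
  rcases m with _ | ⟨h1, t⟩ <;> simp [pvConsHead]

theorem pvSplit_ne_nil (s : List Char) : pvSplit s ≠ [] := by
  induction s using pvSplit.induct with
  | case1 => simp [pvSplit]
  | case2 rest ih => simp [pvSplit]
  | case3 c rest h1 ih =>
    rw [pvSplit.eq_def]
    split
    · simp
    · simp
    · exact pvConsHead_ne_nil _ _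

theorem pvSplit_cons (c : Char) (rest : List Char)
    (h : ¬(c = '}' ∧ rest.head? = some '{')) :
    pvSplit (c :: rest) = pvConsHead [c] (pvSplit rest) := by
  rw [pvSplit.eq_def]
  split
  · simp_all
  · rename_i r heq
    rw [show c = '}' by injection heq] at h
    injection heq with _ heq2
    rw [show rest = '{' :: r from heq2] at h
    simp at h
  · rename_i heq
    injection heq with h1 h2
    subst h1; subst h2; rfl

theorem pvDecoTop_ne_nil (m : List (List Char)) (h : m ≠ []) : pvDecoTop m ≠ [] := by
  rcases m with _ | ⟨p, _ | ⟨q, t⟩⟩ <;> simp_all [pvDecoTop]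

theorem pvDeco_eq (m : List (List Char)) (h : m ≠ []) :
    pvDeco m = pvConsHead ['{'] (pvDecoTop m) := by
  rcases m with _ | ⟨p, _ | ⟨q, t⟩⟩ <;> simp_all [pvDeco, pvDecoTop, pvConsHead]

theorem pvDecoTop_consHead (c : Char) (m : List (List Char)) (h : m ≠ []) :
    pvDecoTop (pvConsHead [c] m) = pvConsHead [c] (pvDecoTop m) := by
  rcases m with _ | ⟨p, _ | ⟨q, t⟩⟩ <;> simp_all [pvConsHead, pvDecoTop]

theorem pvSplitOn_go (fuel : Nat) :
    ∀ (l cur : List Char) (acc : List (List Char)), l.length ≤ fuel →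
      PySem.Chars.splitOn.go ['}', '{'] fuel l cur acc
        = acc.reverse ++ pvConsHead cur.reverse (pvSplit l) := by
  induction fuel with
  | zero =>
    intro l cur acc hl
    have : l = [] := List.eq_nil_of_length_eq_zero (Nat.le_zero.mp hl)
    subst this
    simp [PySem.Chars.splitOn.go, pvSplit, pvConsHead]
  | succ fuel ih =>
    intro l cur acc hl
    rcases l with _ | ⟨c, rest⟩
    · simp [PySem.Chars.splitOn.go, pvSplit, pvConsHead]
    · rcases rest with _ | ⟨d, rest⟩
      · -- one char left: prefix test fails
        have hp : List.isPrefixOf ['}', '{'] [c] = false := by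
          simp [List.isPrefixOf]
        rw [PySem.Chars.splitOn.go.eq_def]
        simp only [hp, Bool.false_eq_true, if_false]
        rw [ih [] (c :: cur) acc (by simp)]
        rw [pvSplit_cons c [] (by simp)]
        simp [pvSplit, pvConsHead]
      · by_cases hm : c = '}' ∧ d = '{'
        · obtain ⟨rfl, rfl⟩ := hm
          have hp : List.isPrefixOf ['}', '{'] ('}' :: '{' :: rest) = true := by
            simp [List.isPrefixOf]
          rw [PySem.Chars.splitOn.go.eq_def]
          simp only [hp, if_true]
          rw [show List.drop (['}', '{'].length) ('}' :: '{' :: rest) = rest from rfl]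
          rw [ih rest [] (cur.reverse :: acc) (by simp at hl ⊢; omega)]
          rw [show pvSplit ('}' :: '{' :: rest) = [] :: pvSplit rest from rfl]
          rcases hsp : pvSplit rest with _ | ⟨h1, t⟩
          · exact absurd hsp (pvSplit_ne_nil rest)
          · simp [pvConsHead]
        · have hp : List.isPrefixOf ['}', '{'] (c :: d :: rest) = false := by
            simp [List.isPrefixOf]
            intro h1 h2
            exact hm ⟨h1.symm, h2.symm⟩
          rw [PySem.Chars.splitOn.go.eq_def]
          simp only [hp, Bool.false_eq_true, if_false]
          rw [ih (d :: rest) (c :: cur) acc (by simp at hl ⊢; omega)]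
          rw [pvSplit_cons c (d :: rest) (by simpa using hm)]
          simp [pvConsHead_consHead]

theorem pvSplitOn_eq (s : List Char) :
    PySem.Chars.splitOn s ['}', '{'] = pvSplit s := by
  rw [PySem.Chars.splitOn, pvSplitOn_go (s.length + 1) s [] [] (by omega)]
  simp [pvConsHead_nil _ (pvSplit_ne_nil s)]

theorem pvSplit_of_not_isIn (s : List Char)
    (h : PySem.Chars.isIn ['}', '{'] s = false) : pvSplit s = [s] := by
  rw [PySem.Chars.isIn_eq_false_iff] at h
  induction s with
  | nil => rfl
  | cons c rest ih =>
    have hc : ¬(c = '}' ∧ rest.head? = some '{') := by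
      rintro ⟨rfl, hh⟩
      rcases rest with _ | ⟨d, r⟩
      · simp at hh
      · simp at hh
        subst hh
        exact h ⟨[], r, by simp⟩
    rw [pvSplit_cons c rest hc,
      ih (fun hi => h (hi.trans (List.suffix_cons c rest).isInfix))]
    simp [pvConsHead]

theorem pvDeco_suffix (parts : List (List Char)) : ∀ (n m : Int), 1 ≤ n →
    m = n + parts.length →
    (PySem.List.enumerate parts n).map
        (fun p =>
          if p.1 ≠ m - 1 then (if p.1 ≠ 0 then '{' :: p.2 else p.2) ++ ['}']
          else (if p.1 ≠ 0 then '{' :: p.2 else p.2))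
      = pvDeco parts := by
  induction parts with
  | nil => intro n m h1 h2; simp [PySem.List.enumerate, pvDeco]
  | cons p t ih =>
    intro n m h1 h2
    rw [PySem.List.enumerate_cons, List.map_cons]
    simp only []
    rw [if_pos (by omega : n ≠ 0)]
    rcases t with _ | ⟨q, t'⟩
    · rw [if_neg (show ¬ n ≠ m - 1 by
        simp only [List.length_cons, List.length_nil] at h2; push_cast at h2; omega)]
      simp [PySem.List.enumerate, pvDeco]
    · rw [if_pos (show n ≠ m - 1 by
        simp only [List.length_cons] at h2; push_cast at h2; omega)]
      rw [ih (n + 1) m (by omega) (by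
        simp only [List.length_cons] at h2 ⊢; push_cast at h2 ⊢; omega)]
      simp [pvDeco]

theorem pvDecoTop_eq_map (parts : List (List Char)) (h : parts ≠ []) :
    (PySem.List.enumerate parts).map
        (fun p =>
          if p.1 ≠ (parts.length : Int) - 1 then (if p.1 ≠ 0 then '{' :: p.2 else p.2) ++ ['}']
          else (if p.1 ≠ 0 then '{' :: p.2 else p.2))
      = pvDecoTop parts := by
  rcases parts with _ | ⟨p, t⟩
  · exact absurd rfl h
  · rw [PySem.List.enumerate_cons, List.map_cons]
    simp only []
    rw [if_neg (by simp : ¬ (0 : Int) ≠ 0)]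
    rcases t with _ | ⟨q, t'⟩
    · rw [if_neg (show ¬ (0 : Int) ≠ ([p].length : Int) - 1 by simp)]
      simp [PySem.List.enumerate, pvDecoTop]
    · rw [if_pos (show (0 : Int) ≠ ((p :: q :: t').length : Int) - 1 by
        simp only [List.length_cons]; push_cast; omega)]
      rw [zero_add]
      rw [pvDeco_suffix (q :: t') 1 ((p :: q :: t').length : Int) (by omega) (by
        simp only [List.length_cons]; push_cast; omega)]
      simp [pvDecoTop]

theorem pvA_fold (parts : List (List Char)) (h : parts ≠ []) :
    (PySem.List.enumerate parts).foldl
        (fun fragments p =>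
          let part := if p.1 ≠ 0 then '{' :: p.2 else p.2
          let part := if p.1 ≠ (parts.length : Int) - 1 then part ++ ['}'] else part
          fragments ++ [part]) []
      = pvDecoTop parts := by
  rw [PySem.List.foldl_append_singleton_eq_map
    (f := fun p : Int × List Char =>
      let part := if p.1 ≠ 0 then '{' :: p.2 else p.2
      let part := if p.1 ≠ (parts.length : Int) - 1 then part ++ ['}'] else part
      part)]
  simp only [List.nil_append]
  rw [← pvDecoTop_eq_map parts h]

theorem pvAltGo_eq (s : List Char) : ∀ (cur : List Char),
    pvAltGo cur s = pvConsHead cur (pvDecoTop (pvSplit s)) := by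
  induction s with
  | nil => intro cur; simp [pvAltGo, pvSplit, pvDecoTop, pvConsHead]
  | cons c rest ih =>
    intro cur
    by_cases hb : (c == '}' && rest.head? == some '{') = true
    · simp only [beq_iff_eq, Bool.and_eq_true] at hb
      obtain ⟨rfl, hh⟩ := hb
      rcases rest with _ | ⟨d, r⟩
      · simp at hh
      · simp at hh
        subst hh
        rw [show pvAltGo cur ('}' :: '{' :: r)
            = (cur ++ ['}']) :: pvAltGo [] ('{' :: r) from by simp [pvAltGo]]
        rw [ih []]
        rw [pvSplit_cons '{' r (by simp)]
        rw [pvDecoTop_consHead '{' _ (pvSplit_ne_nil r)]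
        rw [pvConsHead_nil _ (pvConsHead_ne_nil _ _)]
        rw [← pvDeco_eq _ (pvSplit_ne_nil r)]
        rw [show pvSplit ('}' :: '{' :: r) = [] :: pvSplit r from rfl]
        rcases hsp : pvSplit r with _ | ⟨h1, t⟩
        · exact absurd hsp (pvSplit_ne_nil r)
        · simp [pvDecoTop, pvConsHead]
    · rw [show pvAltGo cur (c :: rest) = pvAltGo (cur ++ [c]) rest from by
        simp only [pvAltGo]; rw [if_neg (by simpa using hb)]]
      rw [ih (cur ++ [c]), ← pvConsHead_consHead,
        ← pvDecoTop_consHead c _ (pvSplit_ne_nil rest),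
        ← pvSplit_cons c rest (by simpa using hb)]

theorem pvAlt_eq_deco (line : String) :
    split_line_into_json_fragments_py_alt line
      = (pvDecoTop (pvSplit line.toList)).map String.ofList := by
  rw [split_line_into_json_fragments_py_alt, pvAltGo_eq,
    pvConsHead_nil _ (pvDecoTop_ne_nil _ (pvSplit_ne_nil _))]

-- ===== VERDICT (by name: the statement is the Claim_ definition above) =====
theorem split_line_into_json_fragments_py_spec : Claim_equal_split_line_into_json_fragments_py := by
  intro line _
  unfold Spec_split_line_into_json_fragments_py split_line_into_json_fragments_py
  rw [pvAlt_eq_deco]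
  by_cases h : PySem.Str.isIn "}{" line = false
  · rw [if_pos h]
    have hs : PySem.Chars.isIn ['}', '{'] line.toList = false := h
    rw [pvSplit_of_not_isIn _ hs]
    simp [pvDecoTop]
  · rw [if_neg h]
    simp only []
    rw [show ("}{".toList) = ['}', '{'] from rfl, pvSplitOn_eq]
    rw [pvA_fold _ (pvSplit_ne_nil _)]
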